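-- pv_equiv track=rewrite | github.com/arthurpcidrao/Python | fundamentals/estacionamento.py | verificar_regiao
-- ===== SOURCE A (Python) =====
-- def verificar_regiao(placa):
--     regioes = {
--         'Tocantins': [('MVL', 'MXG'), ('OLH', 'OLN'), ('OYA', 'OYC'), ('QKA', 'QKM'), ('QWA', 'QWF'), ('RSA', 'RSF')],
--         'Mato Grosso': [('JXZ', 'KAU'), ('NIY', 'NJW'), ('NPC', 'NPQ'), ('NTX', 'NUG'), ('OAP', 'OBS'),
--                         ('QBA', 'QCZ'), ('RAK', 'RAZ'), ('RRI', 'RRZ')],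
--         'Mato Grosso do Sul': [('HQF', 'HTW'), ('NRF', 'NSD'), ('OOG', 'OOU'), ('QAA', 'QAZ'), ('REW', 'REZ'),
--                                ('RWA', 'RWJ')]
--     }
--
--     prefixo = placa[:3]
--
--     for estado, limites in regioes.items():
--         for limite_inf, limite_sup in limites:
--             if limite_inf <= prefixo <= limite_sup:
--                 return estado
--
--     return None
-- ===== SOURCE B (Python) =====
-- # Binary-search lookup over a flat, pre-sorted (lower, upper, state) table
-- # instead of scanning every range of every state.
--
-- _RANGES = [
--     ('HQF', 'HTW', 'Mato Grosso do Sul'),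
--     ('JXZ', 'KAU', 'Mato Grosso'),
--     ('MVL', 'MXG', 'Tocantins'),
--     ('NIY', 'NJW', 'Mato Grosso'),
--     ('NPC', 'NPQ', 'Mato Grosso'),
--     ('NRF', 'NSD', 'Mato Grosso do Sul'),
--     ('NTX', 'NUG', 'Mato Grosso'),
--     ('OAP', 'OBS', 'Mato Grosso'),
--     ('OLH', 'OLN', 'Tocantins'),
--     ('OOG', 'OOU', 'Mato Grosso do Sul'),
--     ('OYA', 'OYC', 'Tocantins'),
--     ('QAA', 'QAZ', 'Mato Grosso do Sul'),
--     ('QBA', 'QCZ', 'Mato Grosso'),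
--     ('QKA', 'QKM', 'Tocantins'),
--     ('QWA', 'QWF', 'Tocantins'),
--     ('RAK', 'RAZ', 'Mato Grosso'),
--     ('REW', 'REZ', 'Mato Grosso do Sul'),
--     ('RRI', 'RRZ', 'Mato Grosso'),
--     ('RSA', 'RSF', 'Tocantins'),
--     ('RWA', 'RWJ', 'Mato Grosso do Sul'),
-- ]
--
--
-- def verificar_regiao(placa):
--     prefixo = placa[:3]
--     # rightmost index i with _RANGES[i][0] <= prefixo, plus one
--     lo, hi = 0, len(_RANGES)
--     while lo < hi:
--         mid = (lo + hi) // 2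
--         if _RANGES[mid][0] <= prefixo:
--             lo = mid + 1
--         else:
--             hi = mid
--     if lo == 0:
--         return None
--     _, upper, estado = _RANGES[lo - 1]
--     if prefixo <= upper:
--         return estado
--     return None
-- ===== Notes on version B (the rewrite author's own statement) =====
-- stated objective: alternative
-- what changed: A's nested linear scan over per-state range lists is replaced by a single flat table pre-sorted by lower bound plus a hand-written binary search for the rightmost lower bound <= prefix, followed by one upper-bound check.
import Mathlib
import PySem

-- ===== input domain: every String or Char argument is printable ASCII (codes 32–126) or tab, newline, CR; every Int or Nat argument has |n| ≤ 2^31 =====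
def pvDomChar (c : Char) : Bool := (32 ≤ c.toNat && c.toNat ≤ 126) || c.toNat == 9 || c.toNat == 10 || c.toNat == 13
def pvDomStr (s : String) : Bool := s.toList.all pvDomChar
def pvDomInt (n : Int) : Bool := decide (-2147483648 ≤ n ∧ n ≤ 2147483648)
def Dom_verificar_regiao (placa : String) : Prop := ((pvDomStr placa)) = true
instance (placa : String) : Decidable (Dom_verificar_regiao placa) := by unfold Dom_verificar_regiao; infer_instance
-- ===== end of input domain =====

-- B replaces A's linear scan over the per-state range lists with one binary search
-- over a flat, pre-sorted (lower, upper, state) table.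

-- ===== PORT A =====
def verificar_regiao (placa : String) : Option String :=
  let regioes : List (String × List (String × String)) :=
    [("Tocantins", [("MVL", "MXG"), ("OLH", "OLN"), ("OYA", "OYC"), ("QKA", "QKM"), ("QWA", "QWF"), ("RSA", "RSF")]),
     ("Mato Grosso", [("JXZ", "KAU"), ("NIY", "NJW"), ("NPC", "NPQ"), ("NTX", "NUG"), ("OAP", "OBS"),
                      ("QBA", "QCZ"), ("RAK", "RAZ"), ("RRI", "RRZ")]),
     ("Mato Grosso do Sul", [("HQF", "HTW"), ("NRF", "NSD"), ("OOG", "OOU"), ("QAA", "QAZ"), ("REW", "REZ"),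
                             ("RWA", "RWJ")])]
  let prefixo := PySem.Str.slice placa none (some 3)
  -- 'for … return estado … return None' = first inner hit, scanned in order
  regioes.findSome? (fun er =>
    er.2.findSome? (fun lim => if lim.1 ≤ prefixo ∧ prefixo ≤ lim.2 then some er.1 else none))

-- ===== PORT B =====
-- _RANGES: the flat table, sorted by lower bound
def vrTable : List (String × String × String) :=
  [("HQF", "HTW", "Mato Grosso do Sul"), ("JXZ", "KAU", "Mato Grosso"), ("MVL", "MXG", "Tocantins"),
   ("NIY", "NJW", "Mato Grosso"), ("NPC", "NPQ", "Mato Grosso"), ("NRF", "NSD", "Mato Grosso do Sul"),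
   ("NTX", "NUG", "Mato Grosso"), ("OAP", "OBS", "Mato Grosso"), ("OLH", "OLN", "Tocantins"),
   ("OOG", "OOU", "Mato Grosso do Sul"), ("OYA", "OYC", "Tocantins"), ("QAA", "QAZ", "Mato Grosso do Sul"),
   ("QBA", "QCZ", "Mato Grosso"), ("QKA", "QKM", "Tocantins"), ("QWA", "QWF", "Tocantins"),
   ("RAK", "RAZ", "Mato Grosso"), ("REW", "REZ", "Mato Grosso do Sul"), ("RRI", "RRZ", "Mato Grosso"),
   ("RSA", "RSF", "Tocantins"), ("RWA", "RWJ", "Mato Grosso do Sul")]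

-- the 'while lo < hi' binary-search loop of Source B (indices are plainly non-negative, kept as Nat;
-- the structural fuel argument only totalizes the loop: hi - lo shrinks each round, so
-- fuel = vrTable.length can never run out)
def vrSearch (p : String) (fuel lo hi : Nat) : Nat :=
  match fuel with
  | 0 => lo
  | fuel + 1 =>
    if lo < hi then
      let mid := (lo + hi) / 2
      if (vrTable.getD mid ("", "", "")).1 ≤ p then vrSearch p fuel (mid + 1) hi
      else vrSearch p fuel lo mid
    else lo

def verificar_regiao_alt (placa : String) : Option String :=
  let prefixo := PySem.Str.slice placa none (some 3)
  let i := vrSearch prefixo vrTable.length 0 vrTable.length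
  if i = 0 then none
  else
    let e := vrTable.getD (i - 1) ("", "", "")
    if prefixo ≤ e.2.1 then some e.2.2 else none

-- ===== PRECONDITION & SPEC =====
def Spec_verificar_regiao (placa : String) (out : Option String) : Prop := out = verificar_regiao_alt placa
instance (placa : String) (out : Option String) : Decidable (Spec_verificar_regiao placa out) := by unfold Spec_verificar_regiao; infer_instance

-- ===== CLAIM (what is proved, stated in full; the proofs are below) =====
def Claim_equal_verificar_regiao : Prop := ∀ (placa : String), Dom_verificar_regiao placa → Spec_verificar_regiao placa (verificar_regiao placa)

-- ===== LEMMAS AND PROOFS =====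

-- A's flattened range list, in A's scan order
def vrFlatA : List (String × String × String) :=
  [("MVL", "MXG", "Tocantins"), ("OLH", "OLN", "Tocantins"), ("OYA", "OYC", "Tocantins"),
   ("QKA", "QKM", "Tocantins"), ("QWA", "QWF", "Tocantins"), ("RSA", "RSF", "Tocantins"),
   ("JXZ", "KAU", "Mato Grosso"), ("NIY", "NJW", "Mato Grosso"), ("NPC", "NPQ", "Mato Grosso"),
   ("NTX", "NUG", "Mato Grosso"), ("OAP", "OBS", "Mato Grosso"), ("QBA", "QCZ", "Mato Grosso"),
   ("RAK", "RAZ", "Mato Grosso"), ("RRI", "RRZ", "Mato Grosso"),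
   ("HQF", "HTW", "Mato Grosso do Sul"), ("NRF", "NSD", "Mato Grosso do Sul"),
   ("OOG", "OOU", "Mato Grosso do Sul"), ("QAA", "QAZ", "Mato Grosso do Sul"),
   ("REW", "REZ", "Mato Grosso do Sul"), ("RWA", "RWJ", "Mato Grosso do Sul")]

def vrMatch (p : String) (e : String × String × String) : Option String :=
  if e.1 ≤ p ∧ p ≤ e.2.1 then some e.2.2 else none

-- lower bounds of vrTable are monotone
lemma vrMono : ∀ j, j < 20 → ∀ i, i ≤ j →
    ((vrTable.getD i ("", "", "")).1).toList ≤ ((vrTable.getD j ("", "", "")).1).toList := by decide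

-- consecutive ranges of vrTable do not touch
lemma vrAdj : ∀ k, k < 19 →
    ((vrTable.getD k ("", "", "")).2.1).toList < ((vrTable.getD (k + 1) ("", "", "")).1).toList := by decide

lemma vrFlatA_sub : ∀ x ∈ vrFlatA, x ∈ vrTable := by decide

lemma vrTable_sub : ∀ x ∈ vrTable, x ∈ vrFlatA := by decide

lemma mem_vrTable_idx {e : String × String × String} (h : e ∈ vrTable) :
    ∃ k, k < 20 ∧ vrTable.getD k ("", "", "") = e := by
  rw [List.mem_iff_getElem] at h
  obtain ⟨i, hi, he⟩ := h
  exact ⟨i, by simpa [vrTable] using hi, by rw [List.getD_eq_getElem _ _ hi]; exact he⟩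

lemma findSome?_flatMap {α β γ : Type} (l : List α) (h : α → List β) (g : β → Option γ) :
    (l.flatMap h).findSome? g = l.findSome? (fun x => (h x).findSome? g) := by
  induction l with
  | nil => rfl
  | cons a t ih =>
    rw [List.flatMap_cons, List.findSome?_append, ih, List.findSome?_cons]
    cases (h a).findSome? g <;> simp [Option.or]

lemma findSome?_eq_some_uniq {α β : Type} {g : α → Option β} {l : List α} {v : β}
    (h : ∃ x ∈ l, g x = some v) (hu : ∀ x ∈ l, g x ≠ none → g x = some v) :
    l.findSome? g = some v := by
  induction l with
  | nil => simp at h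
  | cons a t ih =>
    rw [List.findSome?_cons]
    cases hga : g a with
    | some b =>
      have := hu a (by simp) (by simp [hga])
      rw [hga] at this; exact this
    | none =>
      obtain ⟨x, hx, hgx⟩ := h
      rcases List.mem_cons.mp hx with rfl | hx'
      · rw [hga] at hgx; exact absurd hgx (by simp)
      · exact ih ⟨x, hx', hgx⟩ (fun y hy => hu y (List.mem_cons_of_mem _ hy))

-- two distinct ranges of the table cannot both contain p
lemma vrDisj (p : String) : ∀ k1 k2, k1 < k2 → k2 < 20 →
    p ≤ (vrTable.getD k1 ("", "", "")).2.1 → (vrTable.getD k2 ("", "", "")).1 ≤ p → False := by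
  intro k1 k2 h12 h20 hp1 hp2
  have h1 : ((vrTable.getD k1 ("", "", "")).2.1).toList < ((vrTable.getD (k1 + 1) ("", "", "")).1).toList :=
    vrAdj k1 (by omega)
  have h2 : ((vrTable.getD (k1 + 1) ("", "", "")).1).toList ≤ ((vrTable.getD k2 ("", "", "")).1).toList :=
    vrMono k2 h20 (k1 + 1) (by omega)
  have hp1' := String.le_iff_toList_le.mp hp1
  have hp2' := String.le_iff_toList_le.mp hp2
  have : p.toList < p.toList := lt_of_le_of_lt hp1' (lt_of_lt_of_le h1 (le_trans h2 hp2'))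
  exact absurd this (lt_irrefl _)

-- binary-search invariant: everything left of the result has low ≤ p, nothing from the result on does
theorem vrSearch_inv (p : String) : ∀ (fuel lo hi : Nat), hi - lo ≤ fuel → lo ≤ hi → hi ≤ 20 →
    (∀ k, k < lo → (vrTable.getD k ("", "", "")).1 ≤ p) →
    (∀ k, hi ≤ k → k < 20 → ¬ (vrTable.getD k ("", "", "")).1 ≤ p) →
    vrSearch p fuel lo hi ≤ 20 ∧
    (∀ k, k < vrSearch p fuel lo hi → (vrTable.getD k ("", "", "")).1 ≤ p) ∧
    (∀ k, vrSearch p fuel lo hi ≤ k → k < 20 → ¬ (vrTable.getD k ("", "", "")).1 ≤ p) := by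
  intro fuel
  induction fuel with
  | zero =>
    intro lo hi hfuel hlh h20 hL hR
    have : lo = hi := by omega
    rw [vrSearch]
    exact ⟨by omega, fun k hk => hL k hk, fun k hk hk20 => hR k (by omega) hk20⟩
  | succ fuel ih =>
    intro lo hi hfuel hlh h20 hL hR
    rw [vrSearch]
    by_cases h : lo < hi
    · rw [if_pos h]
      show (if (vrTable.getD ((lo + hi) / 2) ("", "", "")).1 ≤ p
              then vrSearch p fuel ((lo + hi) / 2 + 1) hi else vrSearch p fuel lo ((lo + hi) / 2)) ≤ 20 ∧ _ ∧ _
      by_cases hc : (vrTable.getD ((lo + hi) / 2) ("", "", "")).1 ≤ p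
      · rw [if_pos hc]
        exact ih ((lo + hi) / 2 + 1) hi (by omega) (by omega) h20
          (fun k hk => le_trans
            (String.le_iff_toList_le.mpr (vrMono ((lo + hi) / 2) (by omega) k (by omega))) hc)
          hR
      · rw [if_neg hc]
        exact ih lo ((lo + hi) / 2) (by omega) (by omega) (by omega) hL
          (fun k hk hk20 hle =>
            hc (le_trans (String.le_iff_toList_le.mpr (vrMono k hk20 ((lo + hi) / 2) hk)) hle))
    · rw [if_neg h]
      exact ⟨by omega, fun k hk => hL k hk, fun k hk hk20 => hR k (by omega) hk20⟩

-- the main bridge, for an arbitrary prefix p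
lemma vrMain (p : String) :
    ([("Tocantins", [("MVL", "MXG"), ("OLH", "OLN"), ("OYA", "OYC"), ("QKA", "QKM"), ("QWA", "QWF"), ("RSA", "RSF")]),
      ("Mato Grosso", [("JXZ", "KAU"), ("NIY", "NJW"), ("NPC", "NPQ"), ("NTX", "NUG"), ("OAP", "OBS"),
                       ("QBA", "QCZ"), ("RAK", "RAZ"), ("RRI", "RRZ")]),
      ("Mato Grosso do Sul", [("HQF", "HTW"), ("NRF", "NSD"), ("OOG", "OOU"), ("QAA", "QAZ"), ("REW", "REZ"),
                              ("RWA", "RWJ")])] : List (String × List (String × String))).findSome?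
      (fun er => er.2.findSome? (fun lim => if lim.1 ≤ p ∧ p ≤ lim.2 then some er.1 else none))
    = (if vrSearch p vrTable.length 0 vrTable.length = 0 then none
       else
         if p ≤ (vrTable.getD (vrSearch p vrTable.length 0 vrTable.length - 1) ("", "", "")).2.1
         then some (vrTable.getD (vrSearch p vrTable.length 0 vrTable.length - 1) ("", "", "")).2.2 else none) := by
  -- A's nested scan = linear scan of the flat list
  have hA : ([("Tocantins", [("MVL", "MXG"), ("OLH", "OLN"), ("OYA", "OYC"), ("QKA", "QKM"), ("QWA", "QWF"), ("RSA", "RSF")]),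
      ("Mato Grosso", [("JXZ", "KAU"), ("NIY", "NJW"), ("NPC", "NPQ"), ("NTX", "NUG"), ("OAP", "OBS"),
                       ("QBA", "QCZ"), ("RAK", "RAZ"), ("RRI", "RRZ")]),
      ("Mato Grosso do Sul", [("HQF", "HTW"), ("NRF", "NSD"), ("OOG", "OOU"), ("QAA", "QAZ"), ("REW", "REZ"),
                              ("RWA", "RWJ")])] : List (String × List (String × String))).findSome?
      (fun er => er.2.findSome? (fun lim => if lim.1 ≤ p ∧ p ≤ lim.2 then some er.1 else none))
      = vrFlatA.findSome? (vrMatch p) := by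
    rw [show vrFlatA = ([("Tocantins", [("MVL", "MXG"), ("OLH", "OLN"), ("OYA", "OYC"), ("QKA", "QKM"), ("QWA", "QWF"), ("RSA", "RSF")]),
      ("Mato Grosso", [("JXZ", "KAU"), ("NIY", "NJW"), ("NPC", "NPQ"), ("NTX", "NUG"), ("OAP", "OBS"),
                       ("QBA", "QCZ"), ("RAK", "RAZ"), ("RRI", "RRZ")]),
      ("Mato Grosso do Sul", [("HQF", "HTW"), ("NRF", "NSD"), ("OOG", "OOU"), ("QAA", "QAZ"), ("REW", "REZ"),
                              ("RWA", "RWJ")])] : List (String × List (String × String))).flatMap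
        (fun er => er.2.map (fun lim => (lim.1, lim.2, er.1))) from rfl]
    rw [findSome?_flatMap]
    simp only [List.findSome?_map]
    rfl
  rw [hA]
  have hlen : vrTable.length = 20 := rfl
  rw [hlen]
  obtain ⟨hn20, hbL, hbR⟩ := vrSearch_inv p 20 0 20 (by omega) (by omega) (by omega)
    (fun k hk => absurd hk (Nat.not_lt_zero k)) (fun k hk hk20 => absurd (lt_of_le_of_lt hk hk20) (lt_irrefl _))
  set n := vrSearch p 20 0 20 with hn
  by_cases h0 : n = 0
  · rw [if_pos h0]
    refine List.findSome?_eq_none_iff.mpr (fun x hx => ?_)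
    obtain ⟨k, hk, he⟩ := mem_vrTable_idx (vrFlatA_sub x hx)
    rw [← he]
    exact if_neg (fun hcond => hbR k (by omega) hk hcond.1)
  · rw [if_neg h0]
    have hj : n - 1 < 20 := by omega
    have hjlow : (vrTable.getD (n - 1) ("", "", "")).1 ≤ p := hbL (n - 1) (by omega)
    by_cases hup : p ≤ (vrTable.getD (n - 1) ("", "", "")).2.1
    · rw [if_pos hup]
      refine findSome?_eq_some_uniq ⟨vrTable.getD (n - 1) ("", "", ""), ?_, ?_⟩ ?_
      · exact vrTable_sub _ (by
          rw [List.getD_eq_getElem _ _ (by omega : n - 1 < vrTable.length)]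
          exact List.getElem_mem _)
      · exact if_pos ⟨hjlow, hup⟩
      · intro x hx hne
        obtain ⟨k, hk, he⟩ := mem_vrTable_idx (vrFlatA_sub x hx)
        rw [← he] at hne ⊢
        unfold vrMatch at hne ⊢
        by_cases hcond : (vrTable.getD k ("", "", "")).1 ≤ p ∧ p ≤ (vrTable.getD k ("", "", "")).2.1
        · have hkj : k = n - 1 := by
            rcases Nat.lt_trichotomy k (n - 1) with hlt | heq | hgt
            · exact absurd (vrDisj p k (n - 1) hlt hj hcond.2 hjlow) id
            · exact heq
            · exact absurd hcond.1 (hbR k (by omega) hk)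
          rw [hkj, if_pos ⟨hjlow, hup⟩]
        · exact absurd (if_neg hcond) hne
    · rw [if_neg hup]
      refine List.findSome?_eq_none_iff.mpr (fun x hx => ?_)
      obtain ⟨k, hk, he⟩ := mem_vrTable_idx (vrFlatA_sub x hx)
      rw [← he]
      refine if_neg (fun hcond => ?_)
      rcases Nat.lt_trichotomy k (n - 1) with hlt | heq | hgt
      · exact vrDisj p k (n - 1) hlt hj hcond.2 hjlow
      · exact hup (heq ▸ hcond.2)
      · exact hbR k (by omega) hk hcond.1

-- ===== VERDICT (by name: the statement is the Claim_ definition above) =====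
theorem verificar_regiao_spec : Claim_equal_verificar_regiao := by
  intro placa _
  unfold Spec_verificar_regiao verificar_regiao verificar_regiao_alt
  exact vrMain (PySem.Str.slice placa none (some 3))
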